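-- pv_equiv track=rewrite | github.com/RitikPuranik/TripMind | backend/services/foursquare.py | _cat_to_emoji
-- ===== SOURCE A (Python) =====
-- def _cat_to_emoji(cat: str) -> str:
--     """Map category name to emoji."""
--     c = cat.lower()
--     if any(w in c for w in ["coffee", "café", "cafe"]):  return "☕"
--     if any(w in c for w in ["pizza"]):                   return "🍕"
--     if any(w in c for w in ["burger", "fast food"]):     return "🍔"
--     if any(w in c for w in ["indian", "biryani"]):       return "🍛"
--     if any(w in c for w in ["chinese"]):                 return "🍜"
--     if any(w in c for w in ["restaurant", "dining"]):    return "🍽️"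
--     if any(w in c for w in ["bar", "pub", "brewery"]):   return "🍺"
--     if any(w in c for w in ["park", "garden", "nature"]): return "🌿"
--     if any(w in c for w in ["museum", "art", "gallery"]): return "🏛️"
--     if any(w in c for w in ["mall", "shop", "market"]):   return "🛍️"
--     if any(w in c for w in ["hotel", "resort"]):          return "🏨"
--     if any(w in c for w in ["gym", "fitness"]):           return "💪"
--     if any(w in c for w in ["spa", "salon"]):             return "💆"
--     if any(w in c for w in ["cinema", "movie", "theater"]): return "🎭"
--     if any(w in c for w in ["temple", "mosque", "church"]): return "🛕"
--     if any(w in c for w in ["waterfall", "lake", "river"]): return "💧"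
--     return "📍"
-- ===== SOURCE B (Python) =====
-- _TABLE = [
--     ("☕",  ["coffee", "café", "cafe"]),
--     ("🍕", ["pizza"]),
--     ("🍔", ["burger", "fast food"]),
--     ("🍛", ["indian", "biryani"]),
--     ("🍜", ["chinese"]),
--     ("🍽️", ["restaurant", "dining"]),
--     ("🍺", ["bar", "pub", "brewery"]),
--     ("🌿", ["park", "garden", "nature"]),
--     ("🏛️", ["museum", "art", "gallery"]),
--     ("🛍️", ["mall", "shop", "market"]),
--     ("🏨", ["hotel", "resort"]),
--     ("💪", ["gym", "fitness"]),
--     ("💆", ["spa", "salon"]),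
--     ("🎭", ["cinema", "movie", "theater"]),
--     ("🛕", ["temple", "mosque", "church"]),
--     ("💧", ["waterfall", "lake", "river"]),
-- ]
--
-- # Flat keyword index: keyword -> (priority rank, emoji).  All keywords are distinct.
-- _KEYWORD_RANK = {kw: (rank, emoji)
--                  for rank, (emoji, kws) in enumerate(_TABLE)
--                  for kw in kws}
--
-- def _cat_to_emoji(cat: str) -> str:
--     """Map category name to emoji."""
--     c = cat.lower()
--     return min(
--         (pair for kw, pair in _KEYWORD_RANK.items() if kw in c),
--         default=(len(_TABLE), "📍"),
--     )[1]
-- ===== Notes on version B (the rewrite author's own statement) =====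
-- stated objective: alternative
-- what changed: Instead of A's ordered chain of early-return branch tests, B builds a flat keyword->(rank, emoji) index once, collects ALL matching keywords in a single scan, and returns the emoji of the minimum-rank match (default pin); priority is decided by min over ranks rather than by control flow.
import Mathlib
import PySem

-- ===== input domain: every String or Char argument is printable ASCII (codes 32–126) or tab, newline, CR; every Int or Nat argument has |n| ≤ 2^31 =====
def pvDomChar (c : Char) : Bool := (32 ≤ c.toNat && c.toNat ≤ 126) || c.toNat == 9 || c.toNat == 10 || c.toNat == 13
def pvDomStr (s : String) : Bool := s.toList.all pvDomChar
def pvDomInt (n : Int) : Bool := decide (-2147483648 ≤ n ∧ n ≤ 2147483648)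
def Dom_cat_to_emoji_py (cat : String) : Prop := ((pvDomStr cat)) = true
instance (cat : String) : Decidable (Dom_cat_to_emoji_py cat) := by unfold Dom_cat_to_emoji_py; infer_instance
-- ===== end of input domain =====

-- B replaces A's ordered early-return branch chain by a flat keyword->(rank, emoji) index scanned once, taking the minimum-rank match (alternative algorithm, same cost).


-- ===== PORT A =====
def cat_to_emoji_py (cat : String) : String :=
  let c := PySem.Str.lower cat
  if ["coffee", "café", "cafe"].any (fun w => PySem.Str.isIn w c) then "☕" else
  if ["pizza"].any (fun w => PySem.Str.isIn w c) then "🍕" else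
  if ["burger", "fast food"].any (fun w => PySem.Str.isIn w c) then "🍔" else
  if ["indian", "biryani"].any (fun w => PySem.Str.isIn w c) then "🍛" else
  if ["chinese"].any (fun w => PySem.Str.isIn w c) then "🍜" else
  if ["restaurant", "dining"].any (fun w => PySem.Str.isIn w c) then "🍽️" else
  if ["bar", "pub", "brewery"].any (fun w => PySem.Str.isIn w c) then "🍺" else
  if ["park", "garden", "nature"].any (fun w => PySem.Str.isIn w c) then "🌿" else
  if ["museum", "art", "gallery"].any (fun w => PySem.Str.isIn w c) then "🏛️" else
  if ["mall", "shop", "market"].any (fun w => PySem.Str.isIn w c) then "🛍️" else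
  if ["hotel", "resort"].any (fun w => PySem.Str.isIn w c) then "🏨" else
  if ["gym", "fitness"].any (fun w => PySem.Str.isIn w c) then "💪" else
  if ["spa", "salon"].any (fun w => PySem.Str.isIn w c) then "💆" else
  if ["cinema", "movie", "theater"].any (fun w => PySem.Str.isIn w c) then "🎭" else
  if ["temple", "mosque", "church"].any (fun w => PySem.Str.isIn w c) then "🛕" else
  if ["waterfall", "lake", "river"].any (fun w => PySem.Str.isIn w c) then "💧" else
  "📍"

-- ===== PORT B =====
def pvTable : List (String × List String) :=
  [ ("☕",  ["coffee", "café", "cafe"]),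
    ("🍕", ["pizza"]),
    ("🍔", ["burger", "fast food"]),
    ("🍛", ["indian", "biryani"]),
    ("🍜", ["chinese"]),
    ("🍽️", ["restaurant", "dining"]),
    ("🍺", ["bar", "pub", "brewery"]),
    ("🌿", ["park", "garden", "nature"]),
    ("🏛️", ["museum", "art", "gallery"]),
    ("🛍️", ["mall", "shop", "market"]),
    ("🏨", ["hotel", "resort"]),
    ("💪", ["gym", "fitness"]),
    ("💆", ["spa", "salon"]),
    ("🎭", ["cinema", "movie", "theater"]),
    ("🛕", ["temple", "mosque", "church"]),
    ("💧", ["waterfall", "lake", "river"]) ]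

-- the keyword->(rank, emoji) index of Source B, in insertion order (all 34 keywords distinct)
def pvKeywordRank : Int → List (String × List String) → List (String × Int × String)
  | _, [] => []
  | k, (e, kws) :: rest => kws.map (fun w => (w, k, e)) ++ pvKeywordRank (k + 1) rest

-- Python's min on (rank, emoji) pairs: lexicographic, keep the left argument on a tie
def pvMinPair (a b : Int × String) : Int × String :=
  if b.1 < a.1 ∨ (b.1 = a.1 ∧ b.2 < a.2) then b else a

def cat_to_emoji_py_alt (cat : String) : String :=
  let c := PySem.Str.lower cat
  let matched := (pvKeywordRank 0 pvTable).filter (fun t => PySem.Str.isIn t.1 c)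
  (matched.foldl (fun a t => pvMinPair a t.2) ((pvTable.length : Int), "📍")).2

-- ===== PRECONDITION & SPEC =====
def Spec_cat_to_emoji_py (cat : String) (out : String) : Prop := out = cat_to_emoji_py_alt cat
instance (cat : String) (out : String) : Decidable (Spec_cat_to_emoji_py cat out) := by unfold Spec_cat_to_emoji_py; infer_instance

-- ===== CLAIM =====
def Claim_equal_cat_to_emoji_py : Prop := ∀ (cat : String), Dom_cat_to_emoji_py cat → Spec_cat_to_emoji_py cat (cat_to_emoji_py cat)

-- ===== LEMMAS AND PROOFS =====

-- first-match reading of the table (A's branch chain, abstracted)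
def pvFirst : List (String × List String) → String → String
  | [], _ => "📍"
  | (e, kws) :: rest, c => if kws.any (fun w => PySem.Str.isIn w c) then e else pvFirst rest c

theorem pvA_eq_first (cat : String) :
    cat_to_emoji_py cat = pvFirst pvTable (PySem.Str.lower cat) := by
  simp only [cat_to_emoji_py, pvTable, pvFirst]

theorem pvRank_lb : ∀ (T : List (String × List String)) (j : Int)
    (t : String × Int × String), t ∈ pvKeywordRank j T → j ≤ t.2.1 := by
  intro T
  induction T with
  | nil => intro j t ht; simp [pvKeywordRank] at ht
  | cons h rest ih =>
    intro j t ht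
    obtain ⟨e, kws⟩ := h
    simp only [pvKeywordRank, List.mem_append, List.mem_map] at ht
    rcases ht with ⟨w, _, rfl⟩ | ht
    · exact le_refl j
    · have := ih (j + 1) t ht; omega

theorem pvFold_keep (l : List (String × Int × String)) (a : Int × String)
    (h : ∀ t ∈ l, pvMinPair a t.2 = a) :
    l.foldl (fun a t => pvMinPair a t.2) a = a := by
  induction l with
  | nil => rfl
  | cons x xs ih =>
    simp only [List.foldl_cons, h x (List.mem_cons_self ..)]
    exact ih (fun t ht => h t (List.mem_cons_of_mem _ ht))

theorem pvFold_hit (l : List (String × Int × String)) (k m : Int) (e d : String)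
    (hall : ∀ t ∈ l, t.2 = (k, e)) (hkm : k < m) (hne : l ≠ []) :
    l.foldl (fun a t => pvMinPair a t.2) (m, d) = (k, e) := by
  cases l with
  | nil => exact absurd rfl hne
  | cons x xs =>
    have hx : x.2 = (k, e) := hall x (List.mem_cons_self ..)
    simp only [List.foldl_cons, hx]
    have hstep : pvMinPair (m, d) (k, e) = (k, e) := by
      simp [pvMinPair, hkm]
    rw [hstep]
    refine pvFold_keep _ _ (fun t ht => ?_)
    rw [hall t (List.mem_cons_of_mem _ ht)]
    simp [pvMinPair]

theorem pvFilter_map (kws : List String) (k : Int) (e : String) (p : String → Bool) :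
    (kws.map (fun w => (w, k, e))).filter (fun t => p t.1)
      = (kws.filter p).map (fun w => (w, k, e)) := by
  induction kws with
  | nil => rfl
  | cons w ws ihw =>
    simp only [List.map_cons, List.filter_cons]
    cases h : p w
    · simp [ihw]
    · simp [ihw]

theorem pvMin_eq_first (c : String) : ∀ (T : List (String × List String)) (k m : Int),
    k + (T.length : Int) ≤ m →
    (((pvKeywordRank k T).filter (fun t => PySem.Str.isIn t.1 c)).foldl
        (fun a t => pvMinPair a t.2) (m, "📍")).2 = pvFirst T c := by
  intro T
  induction T with
  | nil => intro k m _; simp [pvKeywordRank, pvFirst]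
  | cons h rest ih =>
    intro k m hm
    obtain ⟨e, kws⟩ := h
    simp only [pvKeywordRank, List.filter_append, List.foldl_append]
    by_cases hmatch : kws.any (fun w => PySem.Str.isIn w c) = true
    · -- some keyword of this group matches: fold reaches (k, e) and stays there
      have hk : k < m := by
        simp only [List.length_cons] at hm; push_cast at hm; omega
      have hfil := pvFilter_map kws k e (fun w => PySem.Str.isIn w c)
      have hne : (kws.filter (fun w => PySem.Str.isIn w c)).map (fun w => (w, k, e)) ≠ [] := by
        simp only [ne_eq, List.map_eq_nil_iff, List.filter_eq_nil_iff]
        intro hcon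
        rcases List.any_eq_true.mp hmatch with ⟨w, hw, hpw⟩
        exact absurd hpw (by simpa using hcon w hw)
      rw [hfil, pvFold_hit _ k m e "📍"
            (by intro t ht; rcases List.mem_map.mp ht with ⟨w, _, rfl⟩; rfl) hk hne]
      rw [pvFold_keep]
      · simp only [pvFirst]; rw [if_pos hmatch]
      · intro t ht
        have ht' := List.mem_of_mem_filter ht
        have hlb := pvRank_lb rest (k + 1) t ht'
        have h1 : ¬ t.2.1 < k := by omega
        have h2 : ¬ t.2.1 = k := by omega
        simp [pvMinPair, h1, h2]
    · -- no keyword of this group matches: the group contributes nothing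
      have hfil : (kws.map (fun w => (w, k, e))).filter (fun t => PySem.Str.isIn t.1 c) = [] := by
        rw [List.filter_eq_nil_iff]
        intro t ht
        rcases List.mem_map.mp ht with ⟨w, hw, rfl⟩
        simp only [List.any_eq_true, not_exists, not_and] at hmatch
        simpa using hmatch w hw
      rw [hfil]
      simp only [List.foldl_nil]
      rw [ih (k + 1) m (by simp only [List.length_cons] at hm; push_cast at hm ⊢; omega)]
      simp only [pvFirst]; rw [if_neg hmatch]

-- ===== VERDICT =====
theorem cat_to_emoji_py_spec : Claim_equal_cat_to_emoji_py := by
  intro cat _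
  unfold Spec_cat_to_emoji_py
  rw [pvA_eq_first, cat_to_emoji_py_alt]
  rw [pvMin_eq_first (PySem.Str.lower cat) pvTable 0 (pvTable.length : Int) (by norm_num)]
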